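-- pv_equiv track=rewrite | github.com/Zikun-Yang/VAMPIRE | src/vampire/scan-backup0323.py | merge_period_tuples
-- ===== SOURCE A (Python) =====
-- from typing import List, Dict, Tuple, Any, Optional
--
-- def merge_period_tuples(period_tuples1: List[Tuple[int, int]], period_tuples2: List[Tuple[int, int]]) -> List[Tuple[int, int]]:
--     """
--     Merge two lists of period tuples
--     Input:
--         period_tuples1: List[Tuple[int, int]]
--         period_tuples2: List[Tuple[int, int]]
--     Output:
--         List[Tuple[int, int]]: the merged period tuples, sorted by period
--     """
--     period_dict = {}
--     for period, length in period_tuples1: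
--         if period in period_dict:
--             period_dict[period] += length
--         else:
--             period_dict[period] = length
--     for period, length in period_tuples2:
--         if period in period_dict:
--             period_dict[period] += length
--         else:
--             period_dict[period] = length
--     return sorted([(p, l) for p, l in period_dict.items()])
-- ===== SOURCE B (Python) =====
-- from typing import List, Tuple
--
--
-- def merge_period_tuples(period_tuples1: List[Tuple[int, int]], period_tuples2: List[Tuple[int, int]]) -> List[Tuple[int, int]]:
--     """Merge two lists of period tuples: sort the concatenation by period,
--     then group equal periods in one linear pass, summing their lengths."""
--     items = sorted(period_tuples1 + period_tuples2, key=lambda t: t[0])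
--     out: List[Tuple[int, int]] = []
--     for p, l in items:
--         if out and out[-1][0] == p:
--             out[-1] = (p, out[-1][1] + l)
--         else:
--             out.append((p, l))
--     return out
-- ===== Notes on version B (the rewrite author's own statement) =====
-- stated objective: alternative
-- what changed: Replaces A's hash-aggregate (dict keyed by period, then sort of the items) by sort-then-scan: sort the concatenated list by period once, then a single linear pass groups adjacent equal periods and sums their lengths, with no dict at all.
import Mathlib
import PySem

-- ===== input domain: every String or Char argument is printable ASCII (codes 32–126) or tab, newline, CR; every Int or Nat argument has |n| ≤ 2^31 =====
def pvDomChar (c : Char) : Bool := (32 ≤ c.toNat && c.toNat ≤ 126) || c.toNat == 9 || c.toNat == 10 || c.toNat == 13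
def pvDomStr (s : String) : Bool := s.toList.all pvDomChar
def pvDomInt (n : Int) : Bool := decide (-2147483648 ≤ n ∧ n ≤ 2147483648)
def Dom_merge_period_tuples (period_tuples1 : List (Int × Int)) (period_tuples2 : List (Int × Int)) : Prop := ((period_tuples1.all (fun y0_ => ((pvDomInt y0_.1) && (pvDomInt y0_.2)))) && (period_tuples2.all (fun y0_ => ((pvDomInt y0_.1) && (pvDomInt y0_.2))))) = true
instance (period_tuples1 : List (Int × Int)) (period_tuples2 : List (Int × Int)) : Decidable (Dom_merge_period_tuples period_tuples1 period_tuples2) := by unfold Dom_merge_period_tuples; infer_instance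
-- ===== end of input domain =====

-- B replaces A's dict-aggregate-then-sort by sort-then-linear-group (same results, no dict); alternative algorithm of similar cost.


-- ===== PORT A =====
-- the loop body of A's two dict-building for-loops
def mptStepA (d : PySem.Dict Int Int) (pl : Int × Int) : PySem.Dict Int Int :=
  if d.contains pl.1 then d.modify pl.1 0 (fun v => v + pl.2) else d.insert pl.1 pl.2

def merge_period_tuples (period_tuples1 : List (Int × Int)) (period_tuples2 : List (Int × Int)) : List (Int × Int) :=
  let d1 := period_tuples1.foldl mptStepA PySem.Dict.empty
  let d2 := period_tuples2.foldl mptStepA d1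
  PySem.List.sorted2 (d2.items.map (fun pl => (pl.1, pl.2))) Prod.fst Prod.snd false

-- ===== PORT B =====
-- the loop body of Source B: merge into the last group or start a new one
def mptStepB (out : List (Int × Int)) (pl : Int × Int) : List (Int × Int) :=
  match out.getLast? with
  | some q => if q.1 = pl.1 then out.dropLast ++ [(pl.1, q.2 + pl.2)] else out ++ [pl]
  | none => out ++ [pl]

def merge_period_tuples_alt (period_tuples1 : List (Int × Int)) (period_tuples2 : List (Int × Int)) : List (Int × Int) :=
  (PySem.List.sorted (period_tuples1 ++ period_tuples2) Prod.fst false).foldl mptStepB []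

-- ===== PRECONDITION & SPEC =====
def Spec_merge_period_tuples (period_tuples1 : List (Int × Int)) (period_tuples2 : List (Int × Int)) (out : List (Int × Int)) : Prop := out = merge_period_tuples_alt period_tuples1 period_tuples2
instance (period_tuples1 : List (Int × Int)) (period_tuples2 : List (Int × Int)) (out : List (Int × Int)) : Decidable (Spec_merge_period_tuples period_tuples1 period_tuples2 out) := by unfold Spec_merge_period_tuples; infer_instance

-- ===== CLAIM (what is proved, stated in full; the proofs are below) =====
def Claim_equal_merge_period_tuples : Prop := ∀ (period_tuples1 : List (Int × Int)) (period_tuples2 : List (Int × Int)), Dom_merge_period_tuples period_tuples1 period_tuples2 → Spec_merge_period_tuples period_tuples1 period_tuples2 (merge_period_tuples period_tuples1 period_tuples2)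

-- ===== LEMMAS AND PROOFS =====

-- total length associated to period p in xs
def mptT (p : Int) (xs : List (Int × Int)) : Int :=
  ((xs.filter (fun q => q.1 == p)).map Prod.snd).sum

-- the comparison sorted2 uses for keys (Prod.fst, Prod.snd)
def mptBef (a b : Int × Int) : Bool :=
  decide (a.1 < b.1) || (!decide (b.1 < a.1) && decide (a.2 < b.2))

-- recursive description of B's grouping loop
def mptGrp (q : Int × Int) : List (Int × Int) → List (Int × Int)
  | [] => [q]
  | x :: t => if q.1 = x.1 then mptGrp (x.1, q.2 + x.2) t else q :: mptGrp x t

-- ---------- generic facts ----------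

theorem mptT_nil (p : Int) : mptT p [] = 0 := rfl

theorem mptT_cons (p : Int) (x : Int × Int) (t : List (Int × Int)) :
    mptT p (x :: t) = if x.1 = p then x.2 + mptT p t else mptT p t := by
  by_cases h : x.1 = p <;> simp [mptT, h]

theorem mptT_eq_zero (p : Int) (t : List (Int × Int)) (h : ∀ y ∈ t, y.1 ≠ p) :
    mptT p t = 0 := by
  have hf : t.filter (fun q => q.1 == p) = [] := by
    apply List.filter_eq_nil_iff.mpr
    intro y hy
    simpa using h y hy
  simp [mptT, hf]

theorem mptT_perm (p : Int) {s t : List (Int × Int)} (h : s.Perm t) : mptT p s = mptT p t := by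
  unfold mptT
  exact ((h.filter _).map _).sum_eq

theorem ofList_sublist {α : Type} [BEq α] [LawfulBEq α] (l : List α) :
    (PySem.Set.ofList l).Sublist l := by
  induction l with
  | nil => simp [PySem.Set.ofList_nil]
  | cons x t ih =>
      rw [PySem.Set.ofList_cons, PySem.Set.discard]
      exact List.Sublist.cons₂ x (List.filter_sublist.trans ih)

theorem discard_eq_self {α : Type} [BEq α] [LawfulBEq α] (s : PySem.Set α) (a : α)
    (h : ∀ y ∈ s, y ≠ a) : PySem.Set.discard s a = s := by
  rw [PySem.Set.discard]
  apply List.filter_eq_self.mpr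
  intro y hy
  simpa using h y hy

theorem discard_discard {α : Type} [BEq α] [LawfulBEq α] (s : PySem.Set α) (a : α) :
    PySem.Set.discard (PySem.Set.discard s a) a = PySem.Set.discard s a := by
  apply discard_eq_self
  intro y hy
  simp only [PySem.Set.mem_discard] at hy
  exact hy.2

theorem discard_cons_self {α : Type} [BEq α] [LawfulBEq α] (x : α) (s : PySem.Set α) :
    PySem.Set.discard (x :: s) x = PySem.Set.discard s x := by
  simp [PySem.Set.discard]

theorem discard_cons_ne {α : Type} [BEq α] [LawfulBEq α] (x a : α) (s : PySem.Set α)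
    (h : x ≠ a) : PySem.Set.discard (x :: s) a = x :: PySem.Set.discard s a := by
  simp [PySem.Set.discard, h]

-- ---------- A's dict fold ----------

theorem mptStepA_eq_modify (d : PySem.Dict Int Int) (pl : Int × Int) :
    mptStepA d pl = d.modify pl.1 0 (fun v => v + pl.2) := by
  by_cases h : d.contains pl.1 = true
  · simp [mptStepA, h]
  · have hc : d.contains pl.1 = false := by simpa using h
    have hg : d.getD pl.1 0 = 0 := PySem.Dict.getD_of_not_contains d 0 hc
    simp [mptStepA, h, PySem.Dict.modify, hg]

theorem mptFoldA_eq (l : List (Int × Int)) (d : PySem.Dict Int Int) :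
    l.foldl mptStepA d = l.foldl (fun d pl => d.modify pl.1 0 (fun v => v + pl.2)) d := by
  induction l generalizing d with
  | nil => rfl
  | cons x t ih => simp [List.foldl_cons, mptStepA_eq_modify, ih]

theorem mptFoldA_getD (l : List (Int × Int)) (d : PySem.Dict Int Int) (c : Int) :
    (l.foldl (fun d pl => d.modify pl.1 0 (fun v => v + pl.2)) d).getD c 0
      = d.getD c 0 + mptT c l := by
  induction l generalizing d with
  | nil => simp [mptT_nil]
  | cons x t ih =>
      rw [List.foldl_cons, ih, PySem.Dict.getD_modify, mptT_cons]
      by_cases h : c = x.1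
      · simp [h, eq_comm]; ring
      · have h' : ¬ x.1 = c := fun hc => h hc.symm
        simp [h, h']

-- ---------- ordering facts about mptBef ----------

theorem mptBef_asymm {a b : Int × Int} (h : mptBef a b = true) : mptBef b a = false := by
  simp only [mptBef, Bool.or_eq_true, Bool.and_eq_true, Bool.not_eq_true',
    decide_eq_true_eq, decide_eq_false_iff_not, Bool.or_eq_false_iff,
    Bool.and_eq_false_iff, Bool.not_eq_false'] at *
  omega

theorem mptBef_trans_aux {x y z : Int × Int} (h1 : mptBef x y = true)
    (h2 : mptBef z y = false) : mptBef z x = false := by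
  simp only [mptBef, Bool.or_eq_true, Bool.and_eq_true, Bool.not_eq_true',
    decide_eq_true_eq, decide_eq_false_iff_not, Bool.or_eq_false_iff,
    Bool.and_eq_false_iff, Bool.not_eq_false'] at *
  omega

-- R a b : "a may come before b" in the sorted2 order
def mptR (a b : Int × Int) : Prop := mptBef b a = false

theorem mptR_lt {a b : Int × Int} (h : mptR a b) (hne : a.1 ≠ b.1) : a.1 < b.1 := by
  simp only [mptR, mptBef, Bool.or_eq_false_iff, Bool.and_eq_false_iff,
    decide_eq_false_iff_not, Bool.not_eq_false'] at h
  omega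

theorem pairwise_insertBy (x : Int × Int) (ys : List (Int × Int))
    (h : ys.Pairwise mptR) : (PySem.List.insertBy mptBef x ys).Pairwise mptR := by
  induction ys with
  | nil => simp [PySem.List.insertBy, List.pairwise_cons]
  | cons y t ih =>
      rcases List.pairwise_cons.mp h with ⟨hy, ht⟩
      by_cases hb : mptBef x y = true
      · have he : PySem.List.insertBy mptBef x (y :: t) = x :: y :: t := by
          simp [PySem.List.insertBy, hb]
        rw [he]
        refine List.pairwise_cons.mpr ⟨?_, h⟩
        intro z hz
        rcases List.mem_cons.mp hz with rfl | hz
        · exact mptBef_asymm hb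
        · exact mptBef_trans_aux hb (hy z hz)
      · have he : PySem.List.insertBy mptBef x (y :: t) = y :: PySem.List.insertBy mptBef x t := by
          simp [PySem.List.insertBy, hb]
        rw [he]
        refine List.pairwise_cons.mpr ⟨?_, ih ht⟩
        intro z hz
        rcases (PySem.List.mem_insertBy mptBef x z t).mp hz with rfl | hz
        · simpa [mptR] using hb
        · exact hy z hz

theorem foldl_insertBy_pairwise (l : List (Int × Int)) (acc : List (Int × Int))
    (h : acc.Pairwise mptR) :
    (l.foldl (fun acc x => PySem.List.insertBy mptBef x acc) acc).Pairwise mptR := by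
  induction l generalizing acc with
  | nil => exact h
  | cons x t ih => exact ih _ (pairwise_insertBy x acc h)

theorem sorted2_eq_foldl (xs : List (Int × Int)) :
    PySem.List.sorted2 xs Prod.fst Prod.snd false
      = xs.foldl (fun acc x => PySem.List.insertBy mptBef x acc) [] := rfl

theorem sorted2_eq_of_perm_of_pairwise_fst_lt (xs ys : List (Int × Int))
    (hperm : ys.Perm xs) (hp : ys.Pairwise (fun a b => a.1 < b.1)) :
    PySem.List.sorted2 xs Prod.fst Prod.snd false = ys := by
  have hsperm : (PySem.List.sorted2 xs Prod.fst Prod.snd false).Perm ys :=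
    (PySem.List.sorted2_perm xs Prod.fst Prod.snd false).trans hperm.symm
  have hsR : (PySem.List.sorted2 xs Prod.fst Prod.snd false).Pairwise mptR := by
    rw [sorted2_eq_foldl]
    exact foldl_insertBy_pairwise xs [] (by simp)
  -- distinct firsts, transported along the permutation
  have hysne : ys.Pairwise (fun a b => a.1 ≠ b.1) := hp.imp (fun h => ne_of_lt h)
  have hysnd : (ys.map Prod.fst).Nodup := List.pairwise_map.mpr hysne
  have hsnd : ((PySem.List.sorted2 xs Prod.fst Prod.snd false).map Prod.fst).Nodup :=
    ((hsperm.map Prod.fst).nodup_iff).mpr hysnd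
  have hne : (PySem.List.sorted2 xs Prod.fst Prod.snd false).Pairwise (fun a b => a.1 ≠ b.1) :=
    List.pairwise_map.mp hsnd
  have hslt : (PySem.List.sorted2 xs Prod.fst Prod.snd false).Pairwise (fun a b => a.1 < b.1) :=
    (hsR.and hne).imp (fun h => mptR_lt h.1 h.2)
  exact List.eq_of_perm_of_sorted
    (fun a b _ _ h1 h2 => absurd h2 (not_lt.mpr h1.le)) hslt hp hsperm

-- ---------- B's grouping loop ----------

theorem foldl_mptStepB (s : List (Int × Int)) (done : List (Int × Int)) (q : Int × Int) :
    s.foldl mptStepB (done ++ [q]) = done ++ mptGrp q s := by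
  induction s generalizing done q with
  | nil => simp [mptGrp]
  | cons x t ih =>
      rw [List.foldl_cons]
      have hlast : (done ++ [q]).getLast? = some q := by simp
      by_cases h : q.1 = x.1
      · have he : mptStepB (done ++ [q]) x = done ++ [(x.1, q.2 + x.2)] := by
          simp [mptStepB, hlast, h]
        rw [he, ih, mptGrp, if_pos h]
      · have he : mptStepB (done ++ [q]) x = (done ++ [q]) ++ [x] := by
          simp [mptStepB, hlast, h]
        rw [he, ih, mptGrp, if_neg h]
        simp

theorem mptGrp_spec (s : List (Int × Int)) : ∀ (p0 a : Int),
    s.Pairwise (fun x y => x.1 ≤ y.1) → (∀ x ∈ s, p0 ≤ x.1) →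
    mptGrp (p0, a) s
      = (p0, a + mptT p0 s) ::
        (PySem.Set.discard (PySem.Set.ofList (s.map Prod.fst)) p0).map (fun p => (p, mptT p s)) := by
  induction s with
  | nil =>
      intro p0 a _ _
      simp [mptGrp, mptT_nil, PySem.Set.ofList_nil, PySem.Set.discard]
  | cons x t ih =>
      intro p0 a hs hlb
      rcases List.pairwise_cons.mp hs with ⟨hx, ht⟩
      rw [List.map_cons, PySem.Set.ofList_cons]
      by_cases h : p0 = x.1
      · subst h
        rw [mptGrp, if_pos rfl, ih x.1 (a + x.2) ht hx,
          discard_cons_self, discard_discard]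
        refine congrArg₂ List.cons ?_ ?_
        · simp [mptT_cons, add_assoc]
        · apply List.map_congr_left
          intro p hp
          simp only [PySem.Set.mem_discard] at hp
          have hpne : ¬ x.1 = p := fun hc => hp.2 hc.symm
          simp [mptT_cons, hpne]
      · have hpx : p0 < x.1 := lt_of_le_of_ne (hlb x (List.mem_cons_self)) h
        have htlb : ∀ y ∈ t, x.1 ≤ y.1 := hx
        have htne : ∀ y ∈ t, y.1 ≠ p0 := fun y hy => by
          have := htlb y hy; omega
        rw [mptGrp, if_neg h, ← Prod.mk.eta (p := x), ih x.1 x.2 ht htlb,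
          discard_cons_ne _ _ _ (fun hc => h hc.symm)]
        have hD : PySem.Set.discard (PySem.Set.discard (PySem.Set.ofList (t.map Prod.fst)) x.1) p0
            = PySem.Set.discard (PySem.Set.ofList (t.map Prod.fst)) x.1 := by
          apply discard_eq_self
          intro y hy
          have hym : y ∈ t.map Prod.fst := by
            simp only [PySem.Set.mem_discard, PySem.Set.mem_ofList] at hy
            exact hy.1
          rcases List.mem_map.mp hym with ⟨z, hz, rfl⟩
          exact htne z hz
        rw [hD]
        have hT0 : mptT p0 (x :: t) = 0 := by
          rw [mptT_cons, if_neg (fun hc => h hc.symm)]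
          exact mptT_eq_zero p0 t htne
        refine congrArg₂ List.cons (by rw [hT0]; simp) ?_
        refine congrArg₂ List.cons (by simp [mptT_cons]) ?_
        apply List.map_congr_left
        intro p hp
        simp only [PySem.Set.mem_discard] at hp
        have hpne : ¬ x.1 = p := fun hc => hp.2 hc.symm
        simp [mptT_cons, hpne]

theorem mptB_eq (s : List (Int × Int)) (hs : s.Pairwise (fun x y => x.1 ≤ y.1)) :
    s.foldl mptStepB [] = (PySem.Set.ofList (s.map Prod.fst)).map (fun p => (p, mptT p s)) := by
  cases s with
  | nil => simp [PySem.Set.ofList_nil]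
  | cons x t =>
      rcases List.pairwise_cons.mp hs with ⟨hx, ht⟩
      have h1 : (x :: t).foldl mptStepB [] = mptGrp x t := by
        rw [List.foldl_cons]
        have hstep : mptStepB [] x = [] ++ [x] := by simp [mptStepB]
        rw [hstep, foldl_mptStepB t [] x]
        simp
      rw [h1, ← Prod.mk.eta (p := x), mptGrp_spec t x.1 x.2 ht hx,
        List.map_cons, PySem.Set.ofList_cons]
      refine congrArg₂ List.cons (by simp [mptT_cons]) ?_
      apply List.map_congr_left
      intro p hp
      simp only [PySem.Set.mem_discard] at hp
      have hpne : ¬ x.1 = p := fun hc => hp.2 hc.symm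
      simp [mptT_cons, hpne]

-- ---------- assembly ----------

theorem mptA_items (xs : List (Int × Int)) :
    (xs.foldl mptStepA PySem.Dict.empty).items
      = (PySem.Set.ofList (xs.map Prod.fst)).map (fun p => (p, mptT p xs)) := by
  rw [mptFoldA_eq]
  have hkeys : (xs.foldl (fun d pl => d.modify pl.1 0 (fun v => v + pl.2)) PySem.Dict.empty).keys
      = PySem.Set.ofList (xs.map Prod.fst) := by
    rw [PySem.Dict.keys_foldl_modify_key xs Prod.fst 0 (fun _ x v => v + x.2) PySem.Dict.empty]
    simp [PySem.Dict.keys_empty, PySem.Set.update_nil_left]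
  have hnd : (xs.foldl (fun d pl => d.modify pl.1 0 (fun v => v + pl.2)) PySem.Dict.empty).keys.Nodup := by
    have := PySem.Dict.nodup_keys_foldl_modify_key xs Prod.fst 0 (fun _ x v => v + x.2)
      PySem.Dict.empty (by simp [PySem.Dict.keys_empty])
    exact this
  rw [PySem.Dict.items_eq_map_keys _ hnd 0, hkeys]
  apply List.map_congr_left
  intro p _
  rw [mptFoldA_getD, PySem.Dict.getD_empty, zero_add]

theorem mpt_main (pt1 pt2 : List (Int × Int)) :
    merge_period_tuples pt1 pt2 = merge_period_tuples_alt pt1 pt2 := by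
  have hfold : pt2.foldl mptStepA (pt1.foldl mptStepA PySem.Dict.empty)
      = (pt1 ++ pt2).foldl mptStepA PySem.Dict.empty := (List.foldl_append).symm
  have hA : merge_period_tuples pt1 pt2
      = PySem.List.sorted2
          ((PySem.Set.ofList ((pt1 ++ pt2).map Prod.fst)).map (fun p => (p, mptT p (pt1 ++ pt2))))
          Prod.fst Prod.snd false := by
    show PySem.List.sorted2 _ Prod.fst Prod.snd false = _
    rw [hfold, mptA_items]
    simp only [List.map_map]
    congr 1
  -- B's value
  have hsp : (PySem.List.sorted (pt1 ++ pt2) Prod.fst false).Perm (pt1 ++ pt2) :=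
    PySem.List.sorted_perm _ _ _
  have hspw : (PySem.List.sorted (pt1 ++ pt2) Prod.fst false).Pairwise (fun x y => x.1 ≤ y.1) :=
    PySem.List.sorted_pairwise (pt1 ++ pt2) Prod.fst
  have hB : merge_period_tuples_alt pt1 pt2
      = (PySem.Set.ofList ((PySem.List.sorted (pt1 ++ pt2) Prod.fst false).map Prod.fst)).map
          (fun p => (p, mptT p (pt1 ++ pt2))) := by
    show (PySem.List.sorted (pt1 ++ pt2) Prod.fst false).foldl mptStepB [] = _
    rw [mptB_eq _ hspw]
    apply List.map_congr_left
    intro p _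
    rw [mptT_perm p hsp]
  rw [hA, hB]
  -- apply the sorted2 uniqueness lemma
  apply sorted2_eq_of_perm_of_pairwise_fst_lt
  · refine List.Perm.map _ ?_
    apply (List.perm_ext_iff_of_nodup (PySem.Set.nodup_ofList _) (PySem.Set.nodup_ofList _)).mpr
    intro a
    simp only [PySem.Set.mem_ofList]
    exact (hsp.map Prod.fst).mem_iff
  · apply List.pairwise_map.mpr
    have hle : ((PySem.List.sorted (pt1 ++ pt2) Prod.fst false).map Prod.fst).Pairwise (· ≤ ·) :=
      List.pairwise_map.mpr hspw
    have hofle : (PySem.Set.ofList ((PySem.List.sorted (pt1 ++ pt2) Prod.fst false).map Prod.fst)).Pairwise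
        ((· ≤ ·) : Int → Int → Prop) := hle.sublist (ofList_sublist _)
    have hofnd : (PySem.Set.ofList ((PySem.List.sorted (pt1 ++ pt2) Prod.fst false).map Prod.fst)).Pairwise
        (fun a b => a ≠ b) := PySem.Set.nodup_ofList _
    exact (hofle.and hofnd).imp (fun h => lt_of_le_of_ne h.1 h.2)

-- ===== VERDICT (by name: the statement is the Claim_ definition above) =====
theorem merge_period_tuples_spec : Claim_equal_merge_period_tuples := by
  intro pt1 pt2 _
  unfold Spec_merge_period_tuples
  exact mpt_main pt1 pt2
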